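-- pv_equiv track=rewrite | github.com/hrushi-provana/endpoint-classification-consumerapi | function_app.py | sanitize_metadata_value
-- ===== SOURCE A (Python) =====
-- def sanitize_metadata_value(value: str) -> str:
--     """Sanitize metadata values for Azure Blob Storage requirements"""
--     if not value:
--         return ""
--
--     sanitized = str(value)
--     sanitized = ''.join(char for char in sanitized if ord(char) >= 32 and ord(char) < 127)
--     sanitized = sanitized.replace('\n', ' ').replace('\r', ' ').replace('\t', ' ')
--     sanitized = ' '.join(sanitized.split())
--
--     if len(sanitized) > 250:
--         sanitized = sanitized[:247] + "..."
--
--     return sanitized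
-- ===== SOURCE B (Python) =====
-- def sanitize_metadata_value(value: str) -> str:
--     """Single-pass sanitizer: one scan with a pending-space flag instead of
--     filter + replace + split/join passes."""
--     if not value:
--         return ""
--     out = []
--     pending = False
--     for ch in str(value):
--         o = ord(ch)
--         if o < 32 or o >= 127:
--             continue
--         if ch == ' ':
--             if out:
--                 pending = True
--         else:
--             if pending:
--                 out.append(' ')
--                 pending = False
--             out.append(ch)
--     result = ''.join(out)
--     if len(result) > 250:
--         result = result[:247] + "..."
--     return result
-- ===== Notes on version B (the rewrite author's own statement) =====
-- stated objective: alternative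
-- what changed: Replaced A's five sequential string passes (filter, three replaces, split+join) by a single left-to-right scan that maintains a pending-space flag to trim and collapse whitespace in one pass.
import Mathlib
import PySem

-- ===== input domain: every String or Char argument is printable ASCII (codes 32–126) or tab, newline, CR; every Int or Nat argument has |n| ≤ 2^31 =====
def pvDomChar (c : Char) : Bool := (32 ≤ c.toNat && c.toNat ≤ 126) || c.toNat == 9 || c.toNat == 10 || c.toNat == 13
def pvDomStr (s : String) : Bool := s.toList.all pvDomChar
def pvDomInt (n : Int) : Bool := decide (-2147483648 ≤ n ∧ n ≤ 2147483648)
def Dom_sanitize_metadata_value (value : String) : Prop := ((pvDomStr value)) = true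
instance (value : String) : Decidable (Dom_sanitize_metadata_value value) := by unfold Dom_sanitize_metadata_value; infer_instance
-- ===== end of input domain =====

-- B replaces A's five sequential string passes by a single scan holding a pending-space flag (same cost class; alternative decomposition).


-- ===== PORT A =====
def sanitize_metadata_value (value : String) : String :=
  if value = "" then ""
  else
    let s1 := value.toList.filter (fun c => 32 ≤ c.toNat && c.toNat < 127)
    let s2 := PySem.Chars.replace (PySem.Chars.replace (PySem.Chars.replace s1 ['\n'] [' ']) ['\r'] [' ']) ['\t'] [' ']
    let s3 := PySem.Chars.join [' '] (PySem.Chars.split₀ s2)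
    if 250 < PySem.Chars.len s3 then
      String.ofList (PySem.Chars.slice s3 none (some 247) ++ "...".toList)
    else String.ofList s3

-- ===== PORT B =====
-- loop body of Source B: skip non-printable, record a pending space, or emit (pending space +) the char
def pvStep (st : List Char × Bool) (c : Char) : List Char × Bool :=
  if c.toNat < 32 || 127 ≤ c.toNat then st
  else if c = ' ' then (st.1, if st.1.isEmpty then st.2 else true)
  else ((if st.2 then st.1 ++ [' '] else st.1) ++ [c], false)

def sanitize_metadata_value_alt (value : String) : String :=
  if value = "" then ""
  else
    let out := (value.toList.foldl pvStep ([], false)).1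
    if 250 < PySem.Chars.len out then
      String.ofList (PySem.Chars.slice out none (some 247) ++ "...".toList)
    else String.ofList out

-- ===== PRECONDITION & SPEC =====
def Spec_sanitize_metadata_value (value : String) (out : String) : Prop := out = sanitize_metadata_value_alt value
instance (value : String) (out : String) : Decidable (Spec_sanitize_metadata_value value out) := by unfold Spec_sanitize_metadata_value; infer_instance

-- ===== CLAIM (what is proved, stated in full; the proofs are below) =====
def Claim_equal_sanitize_metadata_value : Prop := ∀ (value : String), Dom_sanitize_metadata_value value → Spec_sanitize_metadata_value value (sanitize_metadata_value value)

-- ===== LEMMAS AND PROOFS =====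

-- reference normalization: pvN false l trims/collapses spaces of a printable-ASCII list l
def pvN : Bool → List Char → List Char
  | _, [] => []
  | false, c :: t => if c = ' ' then pvN false t else c :: pvN true t
  | true, c :: t => if c = ' ' then (if pvN false t = [] then [] else ' ' :: pvN false t) else c :: pvN true t

lemma pvStep_skip (st : List Char × Bool) (c : Char) (h : ¬ (32 ≤ c.toNat ∧ c.toNat < 127)) :
    pvStep st c = st := by
  unfold pvStep
  have : (c.toNat < 32 || 127 ≤ c.toNat) = true := by
    simp only [Bool.or_eq_true, decide_eq_true_eq]; omega
  simp [this]

lemma pvFoldl_filter (l : List Char) (st : List Char × Bool) :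
    l.foldl pvStep st = (l.filter (fun c => 32 ≤ c.toNat && c.toNat < 127)).foldl pvStep st := by
  induction l generalizing st with
  | nil => rfl
  | cons c t ih =>
    simp only [List.filter_cons, List.foldl_cons]
    cases hb : (32 ≤ c.toNat && c.toNat < 127) with
    | true => exact ih _
    | false =>
      have h : ¬ (32 ≤ c.toNat ∧ c.toNat < 127) := by
        intro hcon; simp [hcon.1, hcon.2] at hb
      rw [pvStep_skip st c h]; exact ih _

lemma pvReplace_go_id (x : Char) (new : List Char) (fuel : Nat) (l acc : List Char) (h : x ∉ l) :
    PySem.Chars.replace.go [x] new fuel l acc = acc.reverse ++ l := by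
  induction fuel generalizing l acc with
  | zero => simp [PySem.Chars.replace.go]
  | succ fuel ih =>
    cases l with
    | nil => simp [PySem.Chars.replace.go]
    | cons c t =>
      have hxc : x ≠ c := by intro e; exact h (e ▸ List.mem_cons_self)
      have hpre : [x].isPrefixOf (c :: t) = false := by
        simp [List.isPrefixOf, hxc]
      rw [PySem.Chars.replace.go]
      simp only [hpre, Bool.false_eq_true, if_false]
      rw [ih t (c :: acc) (fun hm => h (List.mem_cons_of_mem _ hm))]
      simp

lemma pvReplace_id (x : Char) (new l : List Char) (h : x ∉ l) :
    PySem.Chars.replace l [x] new = l := by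
  unfold PySem.Chars.replace
  simp only [List.isEmpty_cons, Bool.false_eq_true, if_false]
  simpa using pvReplace_go_id x new l.length l [] h

lemma pvGo_nil (cur : List Char) (acc : List (List Char)) :
    PySem.Chars.split₀.go [] cur acc = if cur.isEmpty then acc.reverse else (cur.reverse :: acc).reverse := by
  rw [PySem.Chars.split₀.go]

lemma pvGo_cons (c : Char) (t cur : List Char) (acc : List (List Char)) :
    PySem.Chars.split₀.go (c :: t) cur acc =
      if PySem.Chars.isspace c then (if cur.isEmpty then PySem.Chars.split₀.go t [] acc
        else PySem.Chars.split₀.go t [] (cur.reverse :: acc))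
      else PySem.Chars.split₀.go t (c :: cur) acc := by
  rw [PySem.Chars.split₀.go]

lemma pvGo_acc (l cur : List Char) (acc : List (List Char)) :
    PySem.Chars.split₀.go l cur acc = acc.reverse ++ PySem.Chars.split₀.go l cur [] := by
  induction l generalizing cur acc with
  | nil =>
    by_cases h : cur = []
    · simp [pvGo_nil, h]
    · have he : cur.isEmpty = false := by simp [h]
      simp [pvGo_nil, he]
  | cons c t ih =>
    by_cases hs : PySem.Chars.isspace c = true
    · by_cases h : cur = []
      · subst h
        simp only [pvGo_cons, hs, if_true, List.isEmpty_nil]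
        exact ih [] acc
      · have he : cur.isEmpty = false := by simp [h]
        simp only [pvGo_cons, hs, if_true, he, Bool.false_eq_true, if_false]
        rw [ih [] (cur.reverse :: acc), ih [] [cur.reverse]]
        simp
    · have hs' : PySem.Chars.isspace c = false := by simpa using hs
      simp only [pvGo_cons, hs', Bool.false_eq_true, if_false]
      exact ih (c :: cur) acc

lemma pvGo_nonnil (l : List Char) : ∀ (cur : List Char) (acc : List (List Char)), (∀ w ∈ acc, w ≠ []) →
    ∀ w ∈ PySem.Chars.split₀.go l cur acc, w ≠ [] := by
  induction l with
  | nil =>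
    intro cur acc hacc w hw
    by_cases h : cur = []
    · simp [pvGo_nil, h] at hw
      exact hacc w (by simpa using hw)
    · have he : cur.isEmpty = false := by simp [h]
      simp only [pvGo_nil, he, Bool.false_eq_true, if_false, List.mem_reverse, List.mem_cons] at hw
      rcases hw with hw | hw
      · subst hw; simpa using h
      · exact hacc w hw
  | cons c t ih =>
    intro cur acc hacc w hw
    by_cases hs : PySem.Chars.isspace c = true
    · by_cases h : cur = []
      · subst h
        simp only [pvGo_cons, hs, if_true, List.isEmpty_nil] at hw
        exact ih [] acc hacc w hw
      · have he : cur.isEmpty = false := by simp [h]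
        simp only [pvGo_cons, hs, if_true, he, Bool.false_eq_true, if_false] at hw
        refine ih [] (cur.reverse :: acc) ?_ w hw
        intro v hv
        rcases List.mem_cons.mp hv with hv | hv
        · subst hv; simpa using h
        · exact hacc v hv
    · have hs' : PySem.Chars.isspace c = false := by simpa using hs
      simp only [pvGo_cons, hs', Bool.false_eq_true, if_false] at hw
      exact ih (c :: cur) acc hacc w hw

-- printable-ASCII chars: the only whitespace is ' '
lemma pvIsspace_eq (c : Char) (h : 32 ≤ c.toNat ∧ c.toNat < 127) :
    PySem.Chars.isspace c = decide (c = ' ') := by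
  by_cases he : c = ' '
  · subst he; decide
  · have hne : c.toNat ≠ 32 := by
      intro e
      apply he
      have hv : c.val.toNat = 32 := e
      have : c.val = (32 : UInt32) := by
        apply UInt32.toNat_inj.mp; simpa using hv
      exact Char.ext this
    unfold PySem.Chars.isspace
    simp only [he, decide_false]
    simp only [Bool.or_eq_false_iff, Bool.and_eq_false_iff, decide_eq_false_iff_not]
    omega

lemma pvA_side (l : List Char) (h : ∀ c ∈ l, 32 ≤ c.toNat ∧ c.toNat < 127) (cur : List Char) :
    PySem.Chars.join [' '] (PySem.Chars.split₀.go l cur []) =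
      if cur = [] then pvN false l else cur.reverse ++ pvN true l := by
  induction l generalizing cur with
  | nil =>
    by_cases hc : cur = []
    · simp [pvGo_nil, hc, PySem.Chars.join, List.intercalate, pvN]
    · have he : cur.isEmpty = false := by simp [hc]
      simp [pvGo_nil, he, hc, PySem.Chars.join, List.intercalate, List.intersperse, pvN]
  | cons c t ih =>
    have hc := h c List.mem_cons_self
    have ht : ∀ c ∈ t, 32 ≤ c.toNat ∧ c.toNat < 127 := fun c hm => h c (List.mem_cons_of_mem _ hm)
    have hsp := pvIsspace_eq c hc
    by_cases hce : c = ' '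
    · have hs : PySem.Chars.isspace c = true := by rw [hsp, hce]; decide
      by_cases hcur : cur = []
      · subst hcur
        simp only [pvGo_cons, hs, if_true, List.isEmpty_nil]
        rw [ih ht []]
        simp [pvN, hce]
      · have he : cur.isEmpty = false := by simp [hcur]
        simp only [pvGo_cons, hs, if_true, he, Bool.false_eq_true, if_false]
        rw [pvGo_acc t [] [cur.reverse]]
        have hnn := pvGo_nonnil t [] [] (by simp)
        have hIH := ih ht []
        simp only [reduceIte] at hIH
        cases hgo : PySem.Chars.split₀.go t [] [] with
        | nil =>
          have : pvN false t = [] := by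
            rw [← hIH, hgo]; simp [PySem.Chars.join, List.intercalate]
          simp [hgo, PySem.Chars.join, List.intercalate, hcur, pvN, hce, this]
        | cons w ws =>
          have hw : w ≠ [] := hnn w (by rw [hgo]; exact List.mem_cons_self)
          have hjoin : PySem.Chars.join [' '] (w :: ws) ≠ [] := by
            cases ws with
            | nil => simpa [PySem.Chars.join, List.intercalate] using hw
            | cons w' ws' =>
              simp only [PySem.Chars.join, List.intercalate]
              cases w with
              | nil => exact absurd rfl hw
              | cons a b => simp [List.intersperse]
          have hN : pvN false t = PySem.Chars.join [' '] (w :: ws) := by rw [← hIH, hgo]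
          have hNne : pvN false t ≠ [] := by rw [hN]; exact hjoin
          have hjc : PySem.Chars.join [' '] (cur.reverse :: w :: ws) =
              cur.reverse ++ ' ' :: PySem.Chars.join [' '] (w :: ws) := by
            simp [PySem.Chars.join, List.intercalate, List.intersperse]
          have h2 : pvN true (c :: t) = ' ' :: pvN false t := by simp [pvN, hce, hNne]
          simp only [List.reverse_cons, List.reverse_nil, List.nil_append,
            List.singleton_append, hjc, hcur, if_false, h2, ← hN]
    · have hs : PySem.Chars.isspace c = false := by rw [hsp]; simp [hce]
      simp only [pvGo_cons, hs, Bool.false_eq_true, if_false]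
      rw [ih ht (c :: cur)]
      by_cases hcur : cur = []
      · simp [hcur, pvN, hce]
      · simp [hcur, pvN, hce]

lemma pvB_side (l : List Char) (h : ∀ c ∈ l, 32 ≤ c.toNat ∧ c.toNat < 127)
    (out : List Char) (pending : Bool) (hp : pending = true → out ≠ []) :
    (l.foldl pvStep (out, pending)).1 =
      out ++ (if pending then (if pvN false l = [] then [] else ' ' :: pvN false l)
              else if out = [] then pvN false l else pvN true l) := by
  induction l generalizing out pending with
  | nil =>
    cases pending
    · by_cases ho : out = [] <;> simp [pvN, ho]
    · simp [pvN]
  | cons c t ih =>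
    have hc := h c List.mem_cons_self
    have ht : ∀ c ∈ t, 32 ≤ c.toNat ∧ c.toNat < 127 := fun c hm => h c (List.mem_cons_of_mem _ hm)
    have hrange : ¬ ((c.toNat < 32 || 127 ≤ c.toNat) = true) := by
      simp only [Bool.or_eq_true, decide_eq_true_eq, not_or]
      omega
    rw [List.foldl_cons]
    by_cases hce : c = ' '
    · subst hce
      have hstep : ∀ st : List Char × Bool,
          pvStep st ' ' = (st.1, if st.1.isEmpty then st.2 else true) := by
        intro st; simp [pvStep]
      rw [hstep]
      cases pending
      · by_cases ho : out = []
        · subst ho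
          simp only [List.isEmpty_nil, if_true]
          rw [ih ht [] false (by simp)]
          simp [pvN]
        · have he : out.isEmpty = false := by simp [ho]
          simp only [he, Bool.false_eq_true, if_false]
          rw [ih ht out true (fun _ => ho)]
          simp [pvN, ho]
      · have ho := hp rfl
        have he : out.isEmpty = false := by simp [ho]
        simp only [he, Bool.false_eq_true, if_false]
        rw [ih ht out true (fun _ => ho)]
        simp [pvN]
    · have hstep : ∀ st : List Char × Bool,
          pvStep st c = ((if st.2 then st.1 ++ [' '] else st.1) ++ [c], false) := by
        intro st
        unfold pvStep
        rw [if_neg hrange, if_neg hce]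
      rw [hstep]
      cases pending
      · simp only [Bool.false_eq_true, if_false]
        rw [ih ht (out ++ [c]) false (by simp)]
        by_cases ho : out = [] <;> simp [pvN, hce, ho]
      · have ho := hp rfl
        simp only [if_true]
        rw [ih ht (out ++ [' '] ++ [c]) false (by simp)]
        simp [pvN, hce]

-- the two ports build the same character list before the common truncation step
lemma pvLists_eq (value : String) :
    PySem.Chars.join [' ']
      (PySem.Chars.split₀
        (PySem.Chars.replace (PySem.Chars.replace (PySem.Chars.replace
          (value.toList.filter (fun c => 32 ≤ c.toNat && c.toNat < 127)) ['\n'] [' ']) ['\r'] [' ']) ['\t'] [' '])) =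
    (value.toList.foldl pvStep ([], false)).1 := by
  set f := value.toList.filter (fun c => 32 ≤ c.toNat && c.toNat < 127) with hf
  have hmem : ∀ c ∈ f, 32 ≤ c.toNat ∧ c.toNat < 127 := by
    intro c hm
    rw [hf] at hm
    have := List.of_mem_filter hm
    simpa using this
  have hn : ('\n' : Char) ∉ f := fun hm => by have := hmem _ hm; simp [Char.toNat] at this
  have hr1 : PySem.Chars.replace f ['\n'] [' '] = f := pvReplace_id _ _ _ hn
  rw [hr1]
  have hr : ('\r' : Char) ∉ f := fun hm => by have := hmem _ hm; simp [Char.toNat] at this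
  rw [pvReplace_id _ _ _ hr]
  have htb : ('\t' : Char) ∉ f := fun hm => by have := hmem _ hm; simp [Char.toNat] at this
  rw [pvReplace_id _ _ _ htb]
  rw [pvFoldl_filter, ← hf]
  rw [pvB_side f hmem [] false (by simp)]
  have := pvA_side f hmem []
  simp only [reduceIte] at this
  simpa [PySem.Chars.split₀] using this

-- ===== VERDICT (by name: the statement is the Claim_ definition above) =====
theorem sanitize_metadata_value_spec : Claim_equal_sanitize_metadata_value := by
  intro value _
  unfold Spec_sanitize_metadata_value sanitize_metadata_value sanitize_metadata_value_alt
  by_cases h : value = ""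
  · simp [h]
  · simp only [h, if_false]
    rw [pvLists_eq value]
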